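-- pv_equiv track=rewrite | github.com/vikas-t/llms-token-perf | minigit-4/py/commands/branch.py | validate_branch_name
-- ===== SOURCE A (Python) =====
-- def validate_branch_name(name: str) -> bool:
--     """Check if branch name is valid."""
--     if not name:
--         return False
--     if name.startswith('-'):
--         return False
--     if ' ' in name:
--         return False
--     if '..' in name:
--         return False
--     if name.startswith('.') or name.endswith('.'):
--         return False
--     if '@{' in name:
--         return False
--     # Check for invalid characters
--     invalid_chars = ['~', '^', ':', '\\', '?', '*', '[']
--     for c in invalid_chars:
--         if c in name:
--             return False
--     return True
-- ===== SOURCE B (Python) =====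
-- def validate_branch_name(name: str) -> bool:
--     """Check if branch name is valid (single-pass re-implementation)."""
--     if not name or name[0] in '-.' or name.endswith('.'):
--         return False
--     prev = ''
--     for ch in name:
--         if ch in ' ~^:\\?*[' or prev + ch in ('..', '@{'):
--             return False
--         prev = ch
--     return True
-- ===== Notes on version B (the rewrite author's own statement) =====
-- stated objective: alternative
-- what changed: Replaces A's roughly ten separate whole-string substring/membership scans with O(1) end-anchored guards plus a single pass over the characters that tracks the previous character to catch the two forbidden adjacent pairs and the forbidden-character set.
import Mathlib
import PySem

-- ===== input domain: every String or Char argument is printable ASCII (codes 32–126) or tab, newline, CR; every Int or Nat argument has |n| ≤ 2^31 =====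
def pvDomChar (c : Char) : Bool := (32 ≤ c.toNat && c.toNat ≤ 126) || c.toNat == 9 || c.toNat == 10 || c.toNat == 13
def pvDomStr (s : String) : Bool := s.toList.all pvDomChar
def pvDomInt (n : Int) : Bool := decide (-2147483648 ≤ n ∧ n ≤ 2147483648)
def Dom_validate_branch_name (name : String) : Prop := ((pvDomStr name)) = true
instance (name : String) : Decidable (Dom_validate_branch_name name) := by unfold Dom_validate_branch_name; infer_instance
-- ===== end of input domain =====

-- B (alternative): one pass with a previous-character state replaces A's many separate whole-string substring scans (plus O(1) end guards); equivalence of return values is proved.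

-- ===== PORT A =====
-- the explicit loop 'for c in invalid_chars: if c in name: return False'
def pvInvalidLoop : List Char → String → Bool
  | [], _ => true
  | c :: rest, name =>
    if PySem.Str.isIn (String.ofList [c]) name then false else pvInvalidLoop rest name

def validate_branch_name (name : String) : Bool :=
  if name = "" then false
  else if PySem.Str.startswith name "-" then false
  else if PySem.Str.isIn " " name then false
  else if PySem.Str.isIn ".." name then false
  else if PySem.Str.startswith name "." || PySem.Str.endswith name "." then false
  else if PySem.Str.isIn "@{" name then false
  else pvInvalidLoop ['~', '^', ':', '\\', '?', '*', '['] name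

-- ===== PORT B =====
-- ch in ' ~^:\?*['
def pvBad (c : Char) : Bool :=
  c = ' ' || c = '~' || c = '^' || c = ':' || c = '\\' || c = '?' || c = '*' || c = '['

-- the single pass; prev = none models Python's initial prev = ''
def pvScan : Option Char → List Char → Bool
  | _, [] => true
  | prev, c :: rest =>
    if pvBad c || ((prev == some '.' && c == '.') || (prev == some '@' && c == '{')) then false
    else pvScan (some c) rest

def validate_branch_name_alt (name : String) : Bool :=
  match name.toList with
  | [] => false
  | c :: _ =>
    if c = '-' || c = '.' || PySem.Str.endswith name "." then false
    else pvScan none name.toList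

-- ===== PRECONDITION & SPEC =====
def Spec_validate_branch_name (name : String) (out : Bool) : Prop := out = validate_branch_name_alt name
instance (name : String) (out : Bool) : Decidable (Spec_validate_branch_name name out) := by unfold Spec_validate_branch_name; infer_instance

-- ===== CLAIM (what is proved, stated in full; the proofs are below) =====
def Claim_equal_validate_branch_name : Prop := ∀ (name : String), Dom_validate_branch_name name → Spec_validate_branch_name name (validate_branch_name name)

-- ===== LEMMAS AND PROOFS =====

theorem pv_singleton_prefix_iff {b : Char} {l : List Char} : [b] <+: l ↔ l.head? = some b := by
  cases l with
  | nil => simp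
  | cons x xs => simp [List.cons_prefix_cons, eq_comm]

theorem pv_singleton_infix_iff {c : Char} {l : List Char} : [c] <:+: l ↔ c ∈ l := by
  constructor
  · intro h; exact h.sublist.subset (by simp)
  · intro h
    obtain ⟨s, t, rfl⟩ := List.append_of_mem h
    exact ⟨s, t, by simp⟩

theorem pv_pair_infix_cons {a b c : Char} {l : List Char} :
    [a, b] <:+: (c :: l) ↔ (c = a ∧ l.head? = some b) ∨ [a, b] <:+: l := by
  rw [List.infix_cons_iff]
  constructor
  · rintro (h | h)
    · rw [List.cons_prefix_cons] at h
      exact Or.inl ⟨h.1.symm, pv_singleton_prefix_iff.mp h.2⟩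
    · exact Or.inr h
  · rintro (⟨rfl, h⟩ | h)
    · exact Or.inl (List.cons_prefix_cons.mpr ⟨rfl, pv_singleton_prefix_iff.mpr h⟩)
    · exact Or.inr h

theorem pv_isIn_decide (sub l : List Char) : PySem.Chars.isIn sub l = decide (sub <:+: l) := by
  by_cases h : PySem.Chars.isIn sub l = true
  · simp [h, (PySem.Chars.isIn_iff_infix _ _).mp h]
  · simp only [Bool.not_eq_true] at h
    simp [h, (PySem.Chars.isIn_eq_false_iff _ _).mp h]

-- characterization of the single pass
theorem pvScan_spec (l : List Char) (prev : Option Char) :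
    pvScan prev l = true ↔
      (∀ c ∈ l, pvBad c = false) ∧
      ¬ ['.', '.'] <:+: l ∧ ¬ ['@', '{'] <:+: l ∧
      ¬ (prev = some '.' ∧ l.head? = some '.') ∧
      ¬ (prev = some '@' ∧ l.head? = some '{') := by
  induction l generalizing prev with
  | nil => simp [pvScan]
  | cons c rest ih =>
    by_cases hb : pvBad c = true
    · have hstep : pvScan prev (c :: rest) = false := by simp [pvScan, hb]
      rw [hstep]
      simp only [Bool.false_eq_true, false_iff]
      rintro ⟨hall, -⟩
      exact absurd (hall c (by simp)) (by simp [hb])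
    · simp only [Bool.not_eq_true] at hb
      by_cases hp : ((prev == some '.' && c == '.') || (prev == some '@' && c == '{')) = true
      · have hstep : pvScan prev (c :: rest) = false := by simp [pvScan, hp]
        rw [hstep]
        simp only [Bool.or_eq_true, Bool.and_eq_true, beq_iff_eq] at hp
        constructor
        · intro h; exact absurd h (by simp)
        · rintro ⟨-, -, -, h1, h2⟩
          rcases hp with ⟨h, h'⟩ | ⟨h, h'⟩
          · exact absurd ⟨h, by simp [h']⟩ h1
          · exact absurd ⟨h, by simp [h']⟩ h2
      · have hstep : pvScan prev (c :: rest) = pvScan (some c) rest := by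
          simp [pvScan, hb, hp]
        rw [hstep, ih (some c)]
        simp only [Bool.or_eq_true, Bool.and_eq_true, beq_iff_eq, not_or, not_and] at hp
        constructor
        · rintro ⟨hall, hd, ha, hd', ha'⟩
          refine ⟨fun x hx => ?_, ?_, ?_, ?_, ?_⟩
          · rcases List.mem_cons.mp hx with rfl | hx'
            · exact hb
            · exact hall x hx'
          · rw [pv_pair_infix_cons]; rintro (⟨rfl, h⟩ | h)
            · exact hd' ⟨rfl, h⟩
            · exact hd h
          · rw [pv_pair_infix_cons]; rintro (⟨rfl, h⟩ | h)
            · exact ha' ⟨rfl, h⟩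
            · exact ha h
          · rintro ⟨hpre, hh⟩
            exact hp.1 hpre (by simpa using hh)
          · rintro ⟨hpre, hh⟩
            exact hp.2 hpre (by simpa using hh)
        · rintro ⟨hall, hd, ha, -, -⟩
          rw [pv_pair_infix_cons] at hd ha
          push_neg at hd ha
          refine ⟨fun x hx => hall x (List.mem_cons_of_mem _ hx), hd.2, ha.2, ?_, ?_⟩
          · rintro ⟨hc, hh⟩
            exact hd.1 (by injection hc) hh
          · rintro ⟨hc, hh⟩
            exact ha.1 (by injection hc) hh

-- characterization of A's invalid-character loop
theorem pvInvalidLoop_spec (cs : List Char) (name : String) :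
    pvInvalidLoop cs name = true ↔ ∀ c ∈ cs, c ∉ name.toList := by
  induction cs with
  | nil => simp [pvInvalidLoop]
  | cons c rest ih =>
    have hiff : PySem.Str.isIn (String.ofList [c]) name = true ↔ c ∈ name.toList := by
      rw [PySem.Str.isIn_iff_infix]
      simpa using pv_singleton_infix_iff
    by_cases h : c ∈ name.toList
    · rw [pvInvalidLoop, if_pos (hiff.mpr h)]
      simp only [Bool.false_eq_true, false_iff]
      intro hall; exact hall c (by simp) h
    · rw [pvInvalidLoop, if_neg (fun hh => h (hiff.mp hh)), ih]
      constructor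
      · intro hall x hx
        rcases List.mem_cons.mp hx with rfl | hx'
        · exact h
        · exact hall x hx'
      · intro hall x hx; exact hall x (List.mem_cons_of_mem _ hx)

-- the two views of "no forbidden character occurs"
theorem pv_bad_iff (l : List Char) :
    (∀ x ∈ l, pvBad x = false) ↔
      (' ' ∉ l ∧ ∀ b ∈ ['~', '^', ':', '\\', '?', '*', '['], b ∉ l) := by
  constructor
  · intro h
    refine ⟨fun hm => by simpa [pvBad] using h _ hm, ?_⟩
    intro b hb hm
    have := h b hm
    fin_cases hb <;> simp [pvBad] at this
  · rintro ⟨hs, hb⟩ x hx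
    have h7 : ∀ b ∈ ['~', '^', ':', '\\', '?', '*', '['], x ≠ b :=
      fun b hbm hxe => hb b hbm (hxe ▸ hx)
    have hsx : x ≠ ' ' := fun hxe => hs (hxe ▸ hx)
    simp only [List.mem_cons, List.not_mem_nil, or_false, forall_eq_or_imp, forall_eq] at h7
    simp [pvBad, hsx, h7.1, h7.2.1, h7.2.2.1, h7.2.2.2.1, h7.2.2.2.2.1, h7.2.2.2.2.2.1,
      h7.2.2.2.2.2.2]

theorem pv_main (name : String) :
    validate_branch_name name = validate_branch_name_alt name := by
  rw [Bool.eq_iff_iff]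
  unfold validate_branch_name validate_branch_name_alt
  cases hl : name.toList with
  | nil =>
    have hempty : name = "" := by
      have := congrArg String.ofList hl
      simpa using this
    simp [hempty]
  | cons c rest =>
    have hne : ¬ name = "" := by
      intro h; rw [h] at hl; simp at hl
    have hsw : ∀ a : Char, PySem.Str.startswith name (String.ofList [a]) = decide (c = a) := by
      intro a
      have hb : PySem.Str.startswith name (String.ofList [a])
          = PySem.Chars.startswith name.toList [a] := by simp
      rw [hb]
      by_cases hca : c = a
      · have hpre : [a] <+: name.toList := by
          rw [hl, pv_singleton_prefix_iff]; simp [hca]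
        simp [(PySem.Chars.startswith_iff _ _).mpr hpre, hca]
      · have hpre : ¬ [a] <+: name.toList := by
          rw [hl, pv_singleton_prefix_iff]
          simp only [List.head?_cons, Option.some.injEq]
          exact fun h => hca h
        have h2 : PySem.Chars.startswith name.toList [a] ≠ true :=
          fun hh => hpre ((PySem.Chars.startswith_iff _ _).mp hh)
        simp only [Bool.not_eq_true] at h2
        simp [h2, hca]
    have hin : ∀ sub : List Char,
        PySem.Str.isIn (String.ofList sub) name = decide (sub <:+: (c :: rest)) := by
      intro sub
      have h1 : PySem.Str.isIn (String.ofList sub) name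
          = PySem.Chars.isIn sub name.toList := by simp
      rw [h1, hl, pv_isIn_decide]
    simp only [hne, if_false]
    rw [show ("-" : String) = String.ofList ['-'] from rfl,
      show ("." : String) = String.ofList ['.'] from rfl,
      show (" " : String) = String.ofList [' '] from rfl,
      show (".." : String) = String.ofList ['.', '.'] from rfl,
      show ("@{" : String) = String.ofList ['@', '{'] from rfl,
      hsw, hsw, hin, hin, hin]
    by_cases h1 : c = '-'
    · simp [h1]
    · by_cases h2 : c = '.'
      · simp [h1, h2]
      · by_cases hE : PySem.Str.endswith name (String.ofList ['.']) = true
        · rw [hE]; simp [h1, h2]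
        · rw [Bool.not_eq_true] at hE
          rw [hE]
          by_cases hsp : [' '] <:+: (c :: rest)
          · have hspm : (' ' : Char) ∈ c :: rest := pv_singleton_infix_iff.mp hsp
            have hsc : pvScan none (c :: rest) = false := by
              rw [Bool.eq_false_iff]
              intro h
              have := ((pvScan_spec _ _).mp h).1 ' ' hspm
              simp [pvBad] at this
            simp [h1, h2, hsp, hsc]
          · by_cases hdd : ['.', '.'] <:+: (c :: rest)
            · have hsc : pvScan none (c :: rest) = false := by
                rw [Bool.eq_false_iff]
                exact fun h => ((pvScan_spec _ _).mp h).2.1 hdd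
              simp [h1, h2, hsp, hdd, hsc]
            · by_cases hab : ['@', '{'] <:+: (c :: rest)
              · have hsc : pvScan none (c :: rest) = false := by
                  rw [Bool.eq_false_iff]
                  exact fun h => ((pvScan_spec _ _).mp h).2.2.1 hab
                simp [h1, h2, hsp, hdd, hab, hsc]
              · have hred : (∀ x ∈ c :: rest, pvBad x = false) ↔
                    ∀ b ∈ ['~', '^', ':', '\\', '?', '*', '['], b ∉ c :: rest := by
                  rw [pv_bad_iff]
                  constructor
                  · exact fun h => h.2
                  · exact fun h => ⟨fun hm => hsp (pv_singleton_infix_iff.mpr hm), h⟩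
                simp only [h1, h2, hsp, hdd, hab, decide_false, Bool.false_eq_true, reduceIte,
                  Bool.or_self, Bool.or_false]
                rw [pvInvalidLoop_spec, pvScan_spec, hl]
                constructor
                · intro hall
                  exact ⟨hred.mpr hall, hdd, hab, by simp, by simp⟩
                · rintro ⟨hall, -⟩
                  exact hred.mp hall

-- ===== VERDICT (by name: the statement is the Claim_ definition above) =====
theorem validate_branch_name_spec : Claim_equal_validate_branch_name := by
  intro name _
  unfold Spec_validate_branch_name
  exact pv_main name
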